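-- pv_equiv track=rewrite | github.com/pdtkts/flow2api | src/services/cloning_metadata_service.py | _adobe_category_id_by_label
-- ===== SOURCE A (Python) =====
-- from typing import Any, Dict, List, Optional, Tuple
--
-- ADOBE_STOCK_METADATA_CATEGORIES: Tuple[Tuple[int, str], ...] = (
--     (1, "Animals"),
--     (2, "Buildings and Architecture"),
--     (3, "Business"),
--     (4, "Drinks"),
--     (5, "The Environment"),
--     (6, "States of Mind"),
--     (7, "Food"),
--     (8, "Graphic Resources"),
--     (9, "Hobbies and Leisure"),
--     (10, "Industry"),
--     (11, "Landscape"),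
--     (12, "Lifestyle"),
--     (13, "People"),
--     (14, "Plants and Flowers"),
--     (15, "Culture and Religion"),
--     (16, "Science"),
--     (17, "Social Issues"),
--     (18, "Sports"),
--     (19, "Technology"),
--     (20, "Transport"),
--     (21, "Travel"),
-- )
--
-- def _adobe_category_id_by_label(name: str) -> Optional[int]:
--     n = (name or "").strip().lower()
--     if not n:
--         return None
--     for cid, label in ADOBE_STOCK_METADATA_CATEGORIES:
--         if label.lower() == n:
--             return cid
--     return None
-- ===== SOURCE B (Python) =====
-- from typing import Any, Dict, List, Optional, Tuple
--
-- ADOBE_STOCK_METADATA_CATEGORIES: Tuple[Tuple[int, str], ...] = (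
--     (1, "Animals"),
--     (2, "Buildings and Architecture"),
--     (3, "Business"),
--     (4, "Drinks"),
--     (5, "The Environment"),
--     (6, "States of Mind"),
--     (7, "Food"),
--     (8, "Graphic Resources"),
--     (9, "Hobbies and Leisure"),
--     (10, "Industry"),
--     (11, "Landscape"),
--     (12, "Lifestyle"),
--     (13, "People"),
--     (14, "Plants and Flowers"),
--     (15, "Culture and Religion"),
--     (16, "Science"),
--     (17, "Social Issues"),
--     (18, "Sports"),
--     (19, "Technology"),
--     (20, "Transport"),
--     (21, "Travel"),
-- )
--
-- # labels lowered once, sorted lexicographically so lookups can binary-search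
-- _SORTED_LABELS: List[Tuple[str, int]] = sorted(
--     ((label.lower(), cid) for cid, label in ADOBE_STOCK_METADATA_CATEGORIES),
--     key=lambda p: p[0],
-- )
--
-- def _bsearch(pairs: List[Tuple[str, int]], n: str) -> Optional[int]:
--     if not pairs:
--         return None
--     m = len(pairs) // 2
--     key, cid = pairs[m]
--     if n == key:
--         return cid
--     if n < key:
--         return _bsearch(pairs[:m], n)
--     return _bsearch(pairs[m + 1:], n)
--
-- def _adobe_category_id_by_label(name: str) -> Optional[int]:
--     n = (name or "").strip().lower()
--     if not n:
--         return None
--     return _bsearch(_SORTED_LABELS, n)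
-- ===== Notes on version B (the rewrite author's own statement) =====
-- stated objective: alternative
-- what changed: Replaces A's per-call linear scan (which re-lowers every label on every call) with a label-sorted table built once and a recursive binary search over it.
import Mathlib
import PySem

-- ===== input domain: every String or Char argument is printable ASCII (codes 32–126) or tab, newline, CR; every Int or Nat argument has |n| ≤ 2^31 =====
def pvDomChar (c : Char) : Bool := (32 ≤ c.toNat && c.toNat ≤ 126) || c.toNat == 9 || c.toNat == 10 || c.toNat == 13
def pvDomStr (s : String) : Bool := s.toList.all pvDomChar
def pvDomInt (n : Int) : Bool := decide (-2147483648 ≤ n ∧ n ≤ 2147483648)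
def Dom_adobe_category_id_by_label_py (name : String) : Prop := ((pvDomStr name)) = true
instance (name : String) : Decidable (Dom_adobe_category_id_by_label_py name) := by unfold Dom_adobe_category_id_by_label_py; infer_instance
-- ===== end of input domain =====

-- B replaces A's per-call linear scan over the category table (re-lowering every
-- label each call) by a lowercased label-sorted table built once plus a recursive
-- binary search over it (alternative algorithm; same observable behaviour).

-- ===== PORT A =====
-- module-level constant ADOBE_STOCK_METADATA_CATEGORIES
def adobeStockMetadataCategories : List (Int × String) := [
  (1, "Animals"),
  (2, "Buildings and Architecture"),
  (3, "Business"),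
  (4, "Drinks"),
  (5, "The Environment"),
  (6, "States of Mind"),
  (7, "Food"),
  (8, "Graphic Resources"),
  (9, "Hobbies and Leisure"),
  (10, "Industry"),
  (11, "Landscape"),
  (12, "Lifestyle"),
  (13, "People"),
  (14, "Plants and Flowers"),
  (15, "Culture and Religion"),
  (16, "Science"),
  (17, "Social Issues"),
  (18, "Sports"),
  (19, "Technology"),
  (20, "Transport"),
  (21, "Travel")
]

-- the for-loop of A: first (cid, label) with label.lower() == n
def adobeScan : List (Int × String) → String → Option Int
  | [], _ => none
  | (cid, label) :: rest, n =>
      if PySem.Str.lower label == n then some cid else adobeScan rest n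

def adobe_category_id_by_label_py (name : String) : Option Int :=
  -- (name or "") on a str equals name (the empty string is the only falsy str)
  let n := PySem.Str.lower (PySem.Str.strip name)
  if n == "" then none
  else adobeScan adobeStockMetadataCategories n

-- ===== PORT B =====
-- module-level: sorted(((label.lower(), cid) for cid, label in …), key=lambda p: p[0])
def adobeSortedLabels : List (String × Int) :=
  PySem.List.sorted
    (adobeStockMetadataCategories.map (fun p => (PySem.Str.lower p.2, p.1)))
    (fun p => p.1) false

-- _bsearch: recursive binary search; pairs[:m] / pairs[m+1:] are List.take m /
-- List.drop (m+1), exact here since 0 ≤ m < len(pairs)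
def adobeBsearch : List (String × Int) → String → Option Int
  | [], _ => none
  | p :: rest, n =>
      let l := p :: rest
      let m := l.length / 2
      match l[m]? with
      | none => none      -- unreachable: m < l.length
      | some (k, v) =>
        if n == k then some v
        else if n < k then adobeBsearch (l.take m) n
        else adobeBsearch (l.drop (m + 1)) n
termination_by l _ => l.length
decreasing_by
  all_goals (simp [List.length_take]; try omega)

def adobe_category_id_by_label_py_alt (name : String) : Option Int :=
  let n := PySem.Str.lower (PySem.Str.strip name)
  if n == "" then none
  else adobeBsearch adobeSortedLabels n

-- ===== PRECONDITION & SPEC =====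
def Spec_adobe_category_id_by_label_py (name : String) (out : Option Int) : Prop := out = adobe_category_id_by_label_py_alt name
instance (name : String) (out : Option Int) : Decidable (Spec_adobe_category_id_by_label_py name out) := by unfold Spec_adobe_category_id_by_label_py; infer_instance

-- ===== CLAIM (what is proved, stated in full; the proofs are below) =====
def Claim_equal_adobe_category_id_by_label_py : Prop := ∀ (name : String), Dom_adobe_category_id_by_label_py name → Spec_adobe_category_id_by_label_py name (adobe_category_id_by_label_py name)

-- ===== LEMMAS AND PROOFS =====

-- first-match association lookup, the common denominator of both programs
def adobeFind : List (String × Int) → String → Option Int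
  | [], _ => none
  | (k, v) :: rest, n => if k == n then some v else adobeFind rest n

-- the lowered table in A's (original) order
def adobeL : List (String × Int) := [("animals", 1), ("buildings and architecture", 2), ("business", 3), ("drinks", 4), ("the environment", 5), ("states of mind", 6), ("food", 7), ("graphic resources", 8), ("hobbies and leisure", 9), ("industry", 10), ("landscape", 11), ("lifestyle", 12), ("people", 13), ("plants and flowers", 14), ("culture and religion", 15), ("science", 16), ("social issues", 17), ("sports", 18), ("technology", 19), ("transport", 20), ("travel", 21)]

-- B's sorted table, as a literal
def adobeS : List (String × Int) := [("animals", 1), ("buildings and architecture", 2), ("business", 3), ("culture and religion", 15), ("drinks", 4), ("food", 7), ("graphic resources", 8), ("hobbies and leisure", 9), ("industry", 10), ("landscape", 11), ("lifestyle", 12), ("people", 13), ("plants and flowers", 14), ("science", 16), ("social issues", 17), ("sports", 18), ("states of mind", 6), ("technology", 19), ("the environment", 5), ("transport", 20), ("travel", 21)]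

set_option maxHeartbeats 2000000 in
lemma adobeSortedLabels_eq : adobeSortedLabels = adobeS := by
  unfold adobeSortedLabels
  exact PySem.List.sorted_eq_of_perm_of_pairwise_lt _ _ _
    (by decide)
    (by simp only [adobeS, List.pairwise_cons, String.lt_iff_toList_lt]; decide)

lemma adobeScan_eq_find (n : String) :
    adobeScan adobeStockMetadataCategories n = adobeFind adobeL n := by
  simp only [adobeStockMetadataCategories, adobeL, adobeScan, adobeFind,
    show PySem.Str.lower "Animals" = "animals" from rfl, show PySem.Str.lower "Buildings and Architecture" = "buildings and architecture" from rfl, show PySem.Str.lower "Business" = "business" from rfl, show PySem.Str.lower "Drinks" = "drinks" from rfl, show PySem.Str.lower "The Environment" = "the environment" from rfl, show PySem.Str.lower "States of Mind" = "states of mind" from rfl, show PySem.Str.lower "Food" = "food" from rfl, show PySem.Str.lower "Graphic Resources" = "graphic resources" from rfl, show PySem.Str.lower "Hobbies and Leisure" = "hobbies and leisure" from rfl, show PySem.Str.lower "Industry" = "industry" from rfl, show PySem.Str.lower "Landscape" = "landscape" from rfl, show PySem.Str.lower "Lifestyle" = "lifestyle" from rfl, show PySem.Str.lower "People" = "people"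 from rfl, show PySem.Str.lower "Plants and Flowers" = "plants and flowers" from rfl, show PySem.Str.lower "Culture and Religion" = "culture and religion" from rfl, show PySem.Str.lower "Science" = "science" from rfl, show PySem.Str.lower "Social Issues" = "social issues" from rfl, show PySem.Str.lower "Sports" = "sports" from rfl, show PySem.Str.lower "Technology" = "technology" from rfl, show PySem.Str.lower "Transport" = "transport" from rfl, show PySem.Str.lower "Travel" = "travel" from rfl]

lemma adobeFind_append (a b : List (String × Int)) (n : String) :
    adobeFind (a ++ b) n =
      match adobeFind a n with
      | some v => some v
      | none => adobeFind b n := by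
  induction a with
  | nil => rfl
  | cons p rest ih =>
      obtain ⟨k, v⟩ := p
      simp only [List.cons_append, adobeFind]
      by_cases h : k == n <;> simp [h, ih]

lemma adobeFind_eq_none_of (a : List (String × Int)) (n : String)
    (h : ∀ p ∈ a, p.1 ≠ n) : adobeFind a n = none := by
  induction a with
  | nil => rfl
  | cons p rest ih =>
      obtain ⟨k, v⟩ := p
      have hk : k ≠ n := h (k, v) (by simp)
      simp only [adobeFind, beq_iff_eq, if_neg hk]
      exact ih fun q hq => h q (by simp [hq])

lemma adobeFind_perm {a b : List (String × Int)} (h : a.Perm b)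
    (hnd : (a.map Prod.fst).Nodup) (n : String) :
    adobeFind a n = adobeFind b n := by
  induction h with
  | nil => rfl
  | cons p _ ih =>
      obtain ⟨k, v⟩ := p
      simp only [adobeFind]
      rw [ih (by simpa using (List.nodup_cons.mp (by simpa using hnd)).2)]
  | swap p q l =>
      obtain ⟨k₁, v₁⟩ := q
      obtain ⟨k₂, v₂⟩ := p
      have hne : k₁ ≠ k₂ := by
        simp only [List.map_cons, List.nodup_cons, List.mem_cons] at hnd
        exact fun he => hnd.1 (Or.inl he)
      simp only [adobeFind]
      by_cases h1 : k₁ = n <;> by_cases h2 : k₂ = n <;> simp_all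
  | trans h1 _ ih1 ih2 =>
      rw [ih1 hnd, ih2 (((h1.map Prod.fst).nodup_iff).mp hnd)]

lemma adobeBsearch_eq_find : ∀ (N : Nat) (l : List (String × Int)), l.length ≤ N →
    l.Pairwise (fun a b => a.1 < b.1) → ∀ n, adobeBsearch l n = adobeFind l n := by
  intro N
  induction N with
  | zero =>
      intro l hlen _ _
      have : l = [] := List.eq_nil_of_length_eq_zero (Nat.le_zero.mp hlen)
      subst this; simp [adobeBsearch, adobeFind]
  | succ N ih =>
      rintro (_ | ⟨p, rest⟩) hlen hp n
      · simp [adobeBsearch, adobeFind]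
      set L : List (String × Int) := p :: rest with hL
      set m : Nat := L.length / 2 with hm
      have hlpos : 0 < L.length := by simp [hL]
      have hmlt : m < L.length := by omega
      have hget : L[m]? = some L[m] := List.getElem?_eq_getElem hmlt
      rcases hkv : L[m] with ⟨k, v⟩
      have hsplit : L = L.take m ++ (k, v) :: L.drop (m + 1) := by
        conv_lhs => rw [← List.take_append_drop m L]
        rw [List.drop_eq_getElem_cons hmlt, hkv]
      have hb : adobeBsearch L n =
          (if n == k then some v
           else if n < k then adobeBsearch (L.take m) n
           else adobeBsearch (L.drop (m + 1)) n) := by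
        conv_lhs => rw [hL, adobeBsearch]
        simp only [← hL, ← hm, hget, hkv]
      have hp' := hp
      rw [hsplit, List.pairwise_append, List.pairwise_cons] at hp'
      obtain ⟨hpTake, ⟨hkDrop, hpDrop⟩, hCross⟩ := hp'
      have hTakeLt : ∀ q ∈ L.take m, q.1 < k :=
        fun q hq => hCross q hq (k, v) (by simp)
      have hlenTake : (L.take m).length ≤ N := by
        simp only [List.length_take]; omega
      have hlenDrop : (L.drop (m + 1)).length ≤ N := by
        simp only [List.length_drop]; omega
      have hfL := congrArg (fun t => adobeFind t n) hsplit
      simp only [adobeFind_append] at hfL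
      by_cases h1 : n = k
      · subst h1
        rw [adobeFind_eq_none_of (L.take m) n (fun q hq => (hTakeLt q hq).ne)] at hfL
        simp only [adobeFind, beq_self_eq_true, if_true] at hfL
        rw [hb, if_pos (by simp), hfL]
      · by_cases h2 : n < k
        · have hnone : adobeFind ((k, v) :: L.drop (m + 1)) n = none := by
            apply adobeFind_eq_none_of
            intro q hq
            rcases List.mem_cons.mp hq with h | h
            · rw [h]; exact fun he => h1 he.symm
            · exact fun he => absurd (he ▸ hkDrop q h) (lt_asymm h2)
          rw [hnone] at hfL
          rw [hb, if_neg (by simpa using h1), if_pos h2,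
            ih (L.take m) hlenTake hpTake n, hfL]
          cases adobeFind (L.take m) n <;> rfl
        · have h3 : k < n := (lt_or_gt_of_ne h1).resolve_left h2
          rw [adobeFind_eq_none_of (L.take m) n
            (fun q hq => ((hTakeLt q hq).trans h3).ne)] at hfL
          simp only [adobeFind, beq_iff_eq, if_neg h3.ne] at hfL
          rw [hb, if_neg (by simpa using h1), if_neg h2,
            ih (L.drop (m + 1)) hlenDrop hpDrop n, hfL]

lemma final (n : String) : adobeScan adobeStockMetadataCategories n = adobeBsearch adobeSortedLabels n := by
  rw [adobeSortedLabels_eq, adobeScan_eq_find,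
    adobeBsearch_eq_find adobeS.length adobeS le_rfl (by simp only [adobeS, List.pairwise_cons, String.lt_iff_toList_lt]; decide) n,
    adobeFind_perm (a := adobeL) (b := adobeS) (by decide) (by decide) n]

-- ===== VERDICT (by name: the statement is the Claim_ definition above) =====
theorem adobe_category_id_by_label_py_spec : Claim_equal_adobe_category_id_by_label_py := by
  intro name _
  unfold Spec_adobe_category_id_by_label_py adobe_category_id_by_label_py adobe_category_id_by_label_py_alt
  simp only [final]
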